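-- pv_equiv track=rewrite | github.com/hass-a-l-i/Mini-Projects | Cryptography/Shift cipher attack.py | list_shifter
-- ===== SOURCE A (Python) =====
-- def list_shifter(input_list):
--     k = []
--     s = [i for i in range(len(input_list))]
--     for i in s:
--         if i >= len(input_list):
--             k.append(input_list[-1])
--         else:
--             k.append(input_list[i - 1])
--     return k
-- ===== SOURCE B (Python) =====
-- def list_shifter(input_list):
--     return input_list[-1:] + input_list[:-1]
-- ===== Notes on version B (the rewrite author's own statement) =====
-- stated objective: idiomatic
-- what changed: Replaces the index loop (with its dead 'i >= len' branch and per-index appends) by a single slice concatenation last-element + everything-before-it; no iteration or index arithmetic at all.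
import Mathlib
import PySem

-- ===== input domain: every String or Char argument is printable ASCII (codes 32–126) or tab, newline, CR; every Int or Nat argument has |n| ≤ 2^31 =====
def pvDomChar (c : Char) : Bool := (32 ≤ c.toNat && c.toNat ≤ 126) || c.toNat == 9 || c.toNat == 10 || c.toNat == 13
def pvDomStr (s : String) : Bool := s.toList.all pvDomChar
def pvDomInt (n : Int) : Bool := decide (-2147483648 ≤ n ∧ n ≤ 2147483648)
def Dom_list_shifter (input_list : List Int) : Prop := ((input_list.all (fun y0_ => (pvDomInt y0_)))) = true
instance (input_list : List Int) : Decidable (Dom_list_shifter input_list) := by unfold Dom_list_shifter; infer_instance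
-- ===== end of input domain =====

-- B replaces A's index loop by a single slice concatenation (last element ++ everything before it); same return value, no mutation in either version.

-- ===== PORT A =====
def list_shifter (input_list : List Int) : List Int :=
  -- k = []; s = [i for i in range(len(input_list))]; for i in s: k.append(…)
  (PySem.List.pyRange 0 (input_list.length : Int) 1).foldl (fun k i =>
    if i ≥ (input_list.length : Int) then
      k ++ [PySem.List.pyGetD input_list (-1) 0]      -- branch unreachable (i < len); pyGetD default never used
    else
      k ++ [PySem.List.pyGetD input_list (i - 1) 0])  -- i - 1 ∈ [-1, len-2], always in range; default never used
    []

-- ===== PORT B =====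
def list_shifter_alt (input_list : List Int) : List Int :=
  PySem.List.slice input_list (some (-1)) none ++ PySem.List.slice input_list none (some (-1))

-- ===== PRECONDITION & SPEC =====
def Spec_list_shifter (input_list : List Int) (out : List Int) : Prop := out = list_shifter_alt input_list
instance (input_list : List Int) (out : List Int) : Decidable (Spec_list_shifter input_list out) := by unfold Spec_list_shifter; infer_instance

-- ===== CLAIM (what is proved, stated in full; the proofs are below) =====
def Claim_equal_list_shifter : Prop := ∀ (input_list : List Int), Dom_list_shifter input_list → Spec_list_shifter input_list (list_shifter input_list)

-- ===== LEMMAS AND PROOFS =====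

-- A's loop, with its dead branch removed, is a map of j ↦ xs[j-1] over range(len(xs)).
theorem list_shifter_eq_map (xs : List Int) :
    list_shifter xs
      = (List.range xs.length).map (fun (j : Nat) => PySem.List.pyGetD xs ((j : Int) - 1) 0) := by
  unfold list_shifter
  rw [PySem.List.foldl_congr_mem _ _ (fun k i => k ++ [PySem.List.pyGetD xs (i - 1) 0]) _
      (fun acc x hx => by
        rw [PySem.List.mem_pyRange_one] at hx
        rw [if_neg (by omega)]),
    PySem.List.foldl_append_singleton_eq_map, PySem.List.pyRange_one]
  simp [List.map_map, Function.comp_def]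

-- A map of j ↦ xs.getD j 0 over range m (m ≤ len) is take m.
theorem map_getD_range (xs : List Int) (m : ℕ) (hm : m ≤ xs.length) :
    (List.range m).map (fun j => xs.getD j 0) = xs.take m := by
  apply List.ext_getElem
  · simp [Nat.min_eq_left hm]
  · intro i h1 h2
    simp only [List.getElem_map, List.getElem_range, List.getElem_take]
    have : i < xs.length := by simp at h2; omega
    simp [List.getD_eq_getElem?_getD, List.getElem?_eq_getElem this]

theorem list_shifter_spec : Claim_equal_list_shifter := by
  intro xs _
  unfold Spec_list_shifter list_shifter_alt
  rw [list_shifter_eq_map, PySem.List.slice_from_neg_one, PySem.List.slice_to_neg_one]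
  rcases List.eq_nil_or_concat' xs with rfl | ⟨ys, y, rfl⟩
  · simp
  · have hne : ys ++ [y] ≠ [] := by simp
    have hlen : (ys ++ [y]).length = ys.length + 1 := by simp
    rw [hlen, List.range_succ_eq_map, List.map_cons, List.map_map]
    have htail : (List.range ys.length).map
        ((fun (j : Nat) => PySem.List.pyGetD (ys ++ [y]) ((j : Int) - 1) 0) ∘ Nat.succ)
        = (List.range ys.length).map (fun j => (ys ++ [y]).getD j 0) := by
      apply List.map_congr_left
      intro j _
      simp
    rw [htail, map_getD_range _ _ (by simp)]
    simp [PySem.List.pyGetD_neg_one_append_singleton]
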